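-- pv_equiv track=rewrite | github.com/sssungjin/Algorithm | 프로그래머스/2/172927. 광물 캐기/광물 캐기.py | solution
-- ===== SOURCE A (Python) =====
-- def solution(picks, minerals):
--     dia_pick, iron_pick, stone_pick = picks[0], picks[1], picks[2]
--     total_picks = dia_pick + iron_pick + stone_pick
--
--     mineral_arr = []
--     answer = 0
--
--     max_mineral_index = min(len(minerals), total_picks * 5)
--
--     for i in range(0, max_mineral_index, 5):
--         segment = minerals[i:i+5]
--         d_count, i_count, s_count = 0, 0, 0
--
--         for m in segment:
--             if m == "diamond": d_count += 1
--             elif m == "iron": i_count += 1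
--             else: s_count += 1
--
--         mineral_arr.append([d_count, i_count, s_count])
--
--     mineral_arr.sort(key=lambda arr: arr[0] * 25 + arr[1] * 5 + arr[2], reverse=True)
--
--     for arr in mineral_arr:
--         d_count, i_count, s_count = arr[0], arr[1], arr[2]
--
--         if dia_pick > 0:
--             dia_pick -= 1
--             answer += d_count + i_count + s_count
--
--         elif iron_pick > 0:
--             iron_pick -= 1
--             answer += d_count * 5 + i_count * 1 + s_count * 1
--
--         elif stone_pick > 0:
--             stone_pick -= 1
--             answer += d_count * 25 + i_count * 5 + s_count * 1
--
--         else: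
--             break
--
--     return answer
-- ===== SOURCE B (Python) =====
-- def solution(picks, minerals):
--     dia, iron, stone = picks[0], picks[1], picks[2]
--     n = min(len(minerals), (dia + iron + stone) * 5)
--
--     # counting sort: segments go into buckets indexed by their stone-fatigue weight (0..125)
--     buckets = [[] for _ in range(126)]
--     for i in range(0, n, 5):
--         seg = minerals[i:i+5]
--         d = seg.count("diamond")
--         it = seg.count("iron")
--         s = len(seg) - d - it
--         buckets[25 * d + 5 * it + s].append((d, it, s))
--
--     answer = 0
--     for w in range(125, -1, -1):
--         for d, it, s in buckets[w]:
--             if dia > 0: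
--                 dia -= 1
--                 answer += d + it + s
--             elif iron > 0:
--                 iron -= 1
--                 answer += 5 * d + it + s
--             elif stone > 0:
--                 stone -= 1
--                 answer += 25 * d + 5 * it + s
--             else:
--                 return answer
--     return answer
-- ===== Notes on version B (the rewrite author's own statement) =====
-- stated objective: alternative
-- what changed: Replaces the comparison sort of the 5-mineral segments by a stable counting sort into 126 buckets indexed by the bounded fatigue key 25*d+5*i+s (0..125), and counts each segment with list.count instead of a per-element if/elif loop; the greedy pick assignment then scans the buckets in decreasing key order.
import Mathlib
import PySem

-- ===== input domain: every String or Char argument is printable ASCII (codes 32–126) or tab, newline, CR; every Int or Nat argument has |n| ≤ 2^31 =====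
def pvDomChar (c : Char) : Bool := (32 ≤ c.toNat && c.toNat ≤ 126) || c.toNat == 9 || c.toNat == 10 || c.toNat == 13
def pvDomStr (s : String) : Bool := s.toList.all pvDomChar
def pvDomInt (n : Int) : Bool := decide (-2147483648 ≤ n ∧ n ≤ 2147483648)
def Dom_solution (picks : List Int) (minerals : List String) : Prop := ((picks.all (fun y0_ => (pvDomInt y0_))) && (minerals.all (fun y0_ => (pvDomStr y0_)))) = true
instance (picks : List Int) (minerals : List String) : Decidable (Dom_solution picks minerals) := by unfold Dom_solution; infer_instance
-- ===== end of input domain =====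

-- B replaces A's comparison sort of the 5-mineral segments by a stable counting sort on the
-- bounded fatigue key 0..125 (126 buckets, one pass), keeping the same greedy pick assignment.

-- ===== PORT A =====
def countSegA (seg : List String) : Int × Int × Int :=
  seg.foldl
    (fun c m =>
      if m = "diamond" then (c.1 + 1, c.2.1, c.2.2)
      else if m = "iron" then (c.1, c.2.1 + 1, c.2.2)
      else (c.1, c.2.1, c.2.2 + 1))
    (0, 0, 0)

-- A's second loop: `break` becomes the final no-recursion branch
def greedyA : List (Int × Int × Int) → Int → Int → Int → Int → Int
  | [], _, _, _, ans => ans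
  | t :: rest, dia, iron, stone, ans =>
    if dia > 0 then greedyA rest (dia - 1) iron stone (ans + (t.1 + t.2.1 + t.2.2))
    else if iron > 0 then greedyA rest dia (iron - 1) stone (ans + (t.1 * 5 + t.2.1 * 1 + t.2.2 * 1))
    else if stone > 0 then greedyA rest dia iron (stone - 1) (ans + (t.1 * 25 + t.2.1 * 5 + t.2.2 * 1))
    else ans

def solution (picks : List Int) (minerals : List String) : Int :=
  let diaPick := PySem.List.pyGetD picks 0 0
  let ironPick := PySem.List.pyGetD picks 1 0
  let stonePick := PySem.List.pyGetD picks 2 0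
  let totalPicks := diaPick + ironPick + stonePick
  let maxIdx := min (PySem.List.len minerals) (totalPicks * 5)
  let mineralArr := (PySem.List.pyRange 0 maxIdx 5).foldl
      (fun acc i => acc ++ [countSegA (PySem.List.slice minerals (some i) (some (i + 5)))]) []
  greedyA (PySem.List.sorted mineralArr (fun arr => arr.1 * 25 + arr.2.1 * 5 + arr.2.2) true)
    diaPick ironPick stonePick 0

-- ===== PORT B =====
-- B's inner loop; the Bool records Python's early `return answer`
def innerB : List (Int × Int × Int) → Int → Int → Int → Int → Int × Int × Int × Int × Bool
  | [], dia, iron, stone, ans => (dia, iron, stone, ans, false)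
  | t :: rest, dia, iron, stone, ans =>
    if dia > 0 then innerB rest (dia - 1) iron stone (ans + (t.1 + t.2.1 + t.2.2))
    else if iron > 0 then innerB rest dia (iron - 1) stone (ans + (5 * t.1 + t.2.1 + t.2.2))
    else if stone > 0 then innerB rest dia iron (stone - 1) (ans + (25 * t.1 + 5 * t.2.1 + t.2.2))
    else (dia, iron, stone, ans, true)

def runB : List Int → List (List (Int × Int × Int)) → Int → Int → Int → Int → Int
  | [], _, _, _, _, ans => ans
  | w :: ws, bk, dia, iron, stone, ans =>
    let r := innerB (PySem.List.pyGetD bk w []) dia iron stone ans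
    if r.2.2.2.2 then r.2.2.2.1 else runB ws bk r.1 r.2.1 r.2.2.1 r.2.2.2.1

def solution_alt (picks : List Int) (minerals : List String) : Int :=
  let dia := PySem.List.pyGetD picks 0 0
  let iron := PySem.List.pyGetD picks 1 0
  let stone := PySem.List.pyGetD picks 2 0
  let n := min (PySem.List.len minerals) ((dia + iron + stone) * 5)
  let buckets := (PySem.List.pyRange 0 n 5).foldl
      (fun bk i =>
        let seg := PySem.List.slice minerals (some i) (some (i + 5))
        let d : Int := PySem.List.count seg "diamond"
        let it : Int := PySem.List.count seg "iron"
        let s : Int := PySem.List.len seg - d - it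
        PySem.List.pySetD bk (25 * d + 5 * it + s)
          (PySem.List.pyGetD bk (25 * d + 5 * it + s) [] ++ [(d, it, s)]))
      ((PySem.List.pyRange 0 126 1).map (fun _ => ([] : List (Int × Int × Int))))
  runB (PySem.List.pyRange 125 (-1) (-1)) buckets dia iron stone 0

-- ===== PRECONDITION & SPEC =====
-- Python A raises IndexError on picks[0..2] when picks has fewer than 3 elements
def Pre_solution (picks : List Int) (minerals : List String) : Prop := 3 ≤ picks.length
instance (picks : List Int) (minerals : List String) : Decidable (Pre_solution picks minerals) := by unfold Pre_solution; infer_instance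
def pvWitness_solution : List Int × List String := ([1, 1, 1], ["diamond", "stone"])

def Spec_solution (picks : List Int) (minerals : List String) (out : Int) : Prop := out = solution_alt picks minerals
instance (picks : List Int) (minerals : List String) (out : Int) : Decidable (Spec_solution picks minerals out) := by unfold Spec_solution; infer_instance

-- ===== CLAIM (what is proved, stated in full; the proofs are below) =====
def Claim_equal_solution : Prop := ∀ (picks : List Int) (minerals : List String), Dom_solution picks minerals → Pre_solution picks minerals → Spec_solution picks minerals (solution picks minerals)

-- ===== LEMMAS AND PROOFS =====

-- proof-side abbreviations
def pvKey (t : Int × Int × Int) : Int := t.1 * 25 + t.2.1 * 5 + t.2.2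

def tripBseg (seg : List String) : Int × Int × Int :=
  ((PySem.List.count seg "diamond" : Int), (PySem.List.count seg "iron" : Int),
    PySem.List.len seg - (PySem.List.count seg "diamond" : Int) - (PySem.List.count seg "iron" : Int))

def tripB (minerals : List String) (i : Int) : Int × Int × Int :=
  tripBseg (PySem.List.slice minerals (some i) (some (i + 5)))

def insB (bk : List (List (Int × Int × Int))) (t : Int × Int × Int) : List (List (Int × Int × Int)) :=
  PySem.List.pySetD bk (25 * t.1 + 5 * t.2.1 + t.2.2)
    (PySem.List.pyGetD bk (25 * t.1 + 5 * t.2.1 + t.2.2) [] ++ [t])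

theorem keyB_eq (t : Int × Int × Int) : 25 * t.1 + 5 * t.2.1 + t.2.2 = pvKey t := by
  simp [pvKey]; ring

theorem insertBy_append_not_before {α : Type} (before : α → α → Bool) (x : α) (pre suf : List α)
    (h : ∀ a ∈ pre, before x a = false) :
    PySem.List.insertBy before x (pre ++ suf) = pre ++ PySem.List.insertBy before x suf := by
  induction pre with
  | nil => rfl
  | cons y ys ih =>
    have hy : before x y = false := h y (by simp)
    show (if before x y then _ else _) = _
    rw [hy]
    simp only [Bool.false_eq_true, if_false, List.cons_append, List.append_eq]
    rw [ih (fun a ha => h a (by simp [ha]))]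

theorem insertBy_all_before {α : Type} (before : α → α → Bool) (x : α) (l : List α)
    (h : ∀ a ∈ l, before x a = true) :
    PySem.List.insertBy before x l = x :: l := by
  cases l with
  | nil => rfl
  | cons y ys =>
    have hy : before x y = true := h y (by simp)
    show (if before x y then _ else _) = _
    rw [hy]; simp

-- inserting x into buckets concatenated in strictly decreasing key order appends it to its bucket
theorem insertBy_flatMap (x : Int × Int × Int) (ws : List Int)
    (f : Int → List (Int × Int × Int)) (hws : ws.Pairwise (· > ·))
    (hf : ∀ w ∈ ws, ∀ a ∈ f w, pvKey a = w) (hx : pvKey x ∈ ws) :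
    PySem.List.insertBy (fun a b => decide (pvKey b < pvKey a)) x (ws.flatMap f) =
      ws.flatMap (fun w => if w = pvKey x then f w ++ [x] else f w) := by
  induction ws with
  | nil => simp at hx
  | cons w ws ih =>
    rw [List.pairwise_cons] at hws
    simp only [List.flatMap_cons]
    by_cases hwx : w = pvKey x
    · rw [insertBy_append_not_before _ _ _ _ (fun a ha => by
        have : pvKey a = w := hf w (by simp) a ha
        simp [this, hwx])]
      rw [insertBy_all_before _ _ _ (fun a ha => by
        rcases List.mem_flatMap.mp ha with ⟨w', hw', ha'⟩
        have h1 : pvKey a = w' := hf w' (by simp [hw']) a ha'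
        have h2 : w' < w := hws.1 w' hw'
        simp [h1]; omega)]
      rw [if_pos hwx]
      have hrest : ws.flatMap (fun w => if w = pvKey x then f w ++ [x] else f w) = ws.flatMap f := by
        apply List.flatMap_congr
        intro w' hw'
        have h2 : w' < w := hws.1 w' hw'
        rw [if_neg (by omega)]
      rw [hrest]; simp
    · have hx' : pvKey x ∈ ws := by
        rcases List.mem_cons.mp hx with h | h
        · exact absurd h.symm hwx
        · exact h
      have hwgt : w > pvKey x := hws.1 _ hx'
      rw [insertBy_append_not_before _ _ _ _ (fun a ha => by
        have : pvKey a = w := hf w (by simp) a ha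
        simp [this]; omega)]
      rw [ih hws.2 (fun w' hw' => hf w' (by simp [hw'])) hx']
      rw [if_neg hwx]

-- Python's stable reverse sort IS the decreasing-bucket concatenation (counting sort is exact)
theorem sortedRev_eq_flatMap (ws : List Int) (hws : ws.Pairwise (· > ·)) (xs : List (Int × Int × Int))
    (hmem : ∀ a ∈ xs, pvKey a ∈ ws) :
    PySem.List.sorted xs pvKey true =
      ws.flatMap (fun w => xs.filter (fun a => decide (pvKey a = w))) := by
  induction xs using List.reverseRecOn with
  | nil => simp [PySem.List.sorted]
  | append_singleton xs x ih =>
    rw [PySem.List.sorted_rev_eq_foldl_insertBy, List.foldl_append, List.foldl_cons, List.foldl_nil,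
      ← PySem.List.sorted_rev_eq_foldl_insertBy]
    rw [ih (fun a ha => hmem a (by simp [ha]))]
    rw [insertBy_flatMap x ws _ hws
      (by intro w hw a ha; simpa using (List.mem_filter.mp ha).2)
      (hmem x (by simp))]
    apply List.flatMap_congr
    intro w hw
    by_cases hwx : w = pvKey x
    · simp [hwx, List.filter_append]
    · simp [hwx, List.filter_append]
      intro h; exact absurd h.symm hwx

-- the bucket-filling fold keeps bucket w = the (in-order) segments of key w
theorem buildInv (ts : List (Int × Int × Int)) :
    ∀ bk : List (List (Int × Int × Int)), bk.length = 126 →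
    (∀ t ∈ ts, 0 ≤ pvKey t ∧ pvKey t < 126) →
    (ts.foldl insB bk).length = 126 ∧
    ∀ w : Int, 0 ≤ w → w < 126 →
      PySem.List.pyGetD (ts.foldl insB bk) w [] =
        PySem.List.pyGetD bk w [] ++ ts.filter (fun t => decide (pvKey t = w)) := by
  induction ts with
  | nil => intro bk hlen _; exact ⟨hlen, by simp⟩
  | cons t ts ih =>
    intro bk hlen hb
    have hkt := hb t (by simp)
    have hk0 : (0:Int) ≤ 25 * t.1 + 5 * t.2.1 + t.2.2 := by rw [keyB_eq]; exact hkt.1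
    have hins_len : (insB bk t).length = 126 := by
      simp [insB, PySem.List.length_pySetD, hlen]
    have hstep := ih (insB bk t) hins_len (fun u hu => hb u (by simp [hu]))
    refine ⟨by simpa using hstep.1, ?_⟩
    intro w hw0 hw1
    rw [List.foldl_cons, hstep.2 w hw0 hw1]
    have hget : PySem.List.pyGetD (insB bk t) w [] =
        if pvKey t = w then PySem.List.pyGetD bk w [] ++ [t] else PySem.List.pyGetD bk w [] := by
      simp only [insB]
      rw [PySem.List.pySetD_of_nonneg _ _ hk0]
      rw [PySem.List.pyGetD_eq_getElem _ _ hw0 (by simp [List.length_set, hlen]; omega)]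
      rw [List.getElem_set]
      have hkn : (25 * t.1 + 5 * t.2.1 + t.2.2).toNat = (pvKey t).toNat := by rw [keyB_eq]
      by_cases he : pvKey t = w
      · rw [if_pos (by omega), if_pos he, keyB_eq, he]
      · rw [if_neg (by omega), if_neg he]
        rw [PySem.List.pyGetD_eq_getElem _ _ hw0 (by omega)]
    rw [hget]
    by_cases he : pvKey t = w
    · simp [he]
    · simp [he]

theorem inner_greedy (b rest : List (Int × Int × Int)) (dia iron stone ans : Int) :
    greedyA (b ++ rest) dia iron stone ans =
      (let r := innerB b dia iron stone ans;
       if r.2.2.2.2 then r.2.2.2.1 else greedyA rest r.1 r.2.1 r.2.2.1 r.2.2.2.1) := by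
  induction b generalizing dia iron stone ans with
  | nil => simp [innerB]
  | cons t ts ih =>
    by_cases h1 : dia > 0
    · simp only [List.cons_append, greedyA, innerB, if_pos h1]
      exact ih _ _ _ _
    · by_cases h2 : iron > 0
      · simp only [List.cons_append, greedyA, innerB, if_neg h1, if_pos h2]
        rw [show t.1 * 5 + t.2.1 * 1 + t.2.2 * 1 = 5 * t.1 + t.2.1 + t.2.2 from by ring]
        exact ih _ _ _ _
      · by_cases h3 : stone > 0
        · simp only [List.cons_append, greedyA, innerB, if_neg h1, if_neg h2, if_pos h3]
          rw [show t.1 * 25 + t.2.1 * 5 + t.2.2 * 1 = 25 * t.1 + 5 * t.2.1 + t.2.2 from by ring]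
          exact ih _ _ _ _
        · simp only [List.cons_append, greedyA, innerB, if_neg h1, if_neg h2, if_neg h3]
          simp

theorem run_greedy (ws : List Int) (bk : List (List (Int × Int × Int))) (dia iron stone ans : Int) :
    runB ws bk dia iron stone ans =
      greedyA (ws.flatMap (fun w => PySem.List.pyGetD bk w [])) dia iron stone ans := by
  induction ws generalizing dia iron stone ans with
  | nil => simp [runB, greedyA]
  | cons w ws ih =>
    simp only [List.flatMap_cons]
    rw [inner_greedy]
    simp only [runB]
    split
    · rfl
    · exact ih _ _ _ _

theorem countSegA_fold (seg : List String) : ∀ a b c : Int,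
    seg.foldl
      (fun c m =>
        if m = "diamond" then (c.1 + 1, c.2.1, c.2.2)
        else if m = "iron" then (c.1, c.2.1 + 1, c.2.2)
        else (c.1, c.2.1, c.2.2 + 1))
      (a, b, c) =
    (a + seg.count "diamond", b + seg.count "iron",
      c + (seg.length : Int) - seg.count "diamond" - seg.count "iron") := by
  induction seg with
  | nil => intro a b c; simp
  | cons m seg ih =>
    intro a b c
    by_cases h1 : m = "diamond"
    · simp only [List.foldl_cons, ih, List.count_cons, List.length_cons, h1]
      simp
      all_goals omega
    · by_cases h2 : m = "iron"
      · simp only [List.foldl_cons, ih, List.count_cons, List.length_cons, h2]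
        simp
        all_goals omega
      · simp only [List.foldl_cons, if_neg h1, if_neg h2, ih, List.count_cons, List.length_cons]
        simp [h1, h2]
        all_goals omega

theorem countSegA_eq (seg : List String) : countSegA seg = tripBseg seg := by
  rw [countSegA, countSegA_fold, tripBseg]
  simp [PySem.List.count_eq, PySem.List.len_eq]

theorem count_two_le (l : List String) : l.count "diamond" + l.count "iron" ≤ l.length := by
  induction l with
  | nil => simp
  | cons m l ih =>
    simp only [List.count_cons, List.length_cons]
    by_cases h1 : m = "diamond" <;> by_cases h2 : m = "iron" <;> simp_all <;> omega

theorem trip_bounds (minerals : List String) (i : Int) (hi : 0 ≤ i) :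
    0 ≤ pvKey (tripB minerals i) ∧ pvKey (tripB minerals i) < 126 := by
  have hlen : (PySem.List.slice minerals (some i) (some (i + 5))).length ≤ 5 := by
    rw [PySem.List.slice_toNat _ hi (by omega)]
    have : (i + 5).toNat - i.toNat = 5 := by omega
    rw [this]
    exact (List.length_take_le _ _)
  set seg := PySem.List.slice minerals (some i) (some (i + 5)) with hseg
  have h2 := count_two_le seg
  have h3 : seg.count "diamond" ≤ seg.length := List.count_le_length
  simp only [tripB, tripBseg, pvKey, ← hseg, PySem.List.count_eq, PySem.List.len_eq]
  constructor <;> omega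

-- the descending weight range 125..0
theorem ws_pairwise : (PySem.List.pyRange 125 (-1) (-1)).Pairwise (· > ·) := by
  rw [PySem.List.pyRange_neg_one_eq_reverse]
  rw [List.pairwise_reverse]
  norm_num
  exact PySem.List.pairwise_lt_pyRange_one _ _

theorem ws_mem (x : Int) (h0 : 0 ≤ x) (h1 : x < 126) : x ∈ PySem.List.pyRange 125 (-1) (-1) := by
  rw [PySem.List.mem_pyRange_neg_one]
  omega

theorem ws_mem_bounds (x : Int) (h : x ∈ PySem.List.pyRange 125 (-1) (-1)) : 0 ≤ x ∧ x < 126 := by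
  rw [PySem.List.mem_pyRange_neg_one] at h
  omega

-- main bridge, stated on the port bodies
theorem main_bridge (minerals : List String) (dia iron stone N : Int) :
    greedyA (PySem.List.sorted
        ((PySem.List.pyRange 0 N 5).foldl
          (fun acc i => acc ++ [countSegA (PySem.List.slice minerals (some i) (some (i + 5)))]) [])
        (fun arr => arr.1 * 25 + arr.2.1 * 5 + arr.2.2) true) dia iron stone 0 =
      runB (PySem.List.pyRange 125 (-1) (-1))
        ((PySem.List.pyRange 0 N 5).foldl
          (fun bk i =>
            let seg := PySem.List.slice minerals (some i) (some (i + 5))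
            let d : Int := PySem.List.count seg "diamond"
            let it : Int := PySem.List.count seg "iron"
            let s : Int := PySem.List.len seg - d - it
            PySem.List.pySetD bk (25 * d + 5 * it + s)
              (PySem.List.pyGetD bk (25 * d + 5 * it + s) [] ++ [(d, it, s)]))
          ((PySem.List.pyRange 0 126 1).map (fun _ => ([] : List (Int × Int × Int)))))
        dia iron stone 0 := by
  -- name the segment list
  rw [PySem.List.foldl_append_singleton_eq_map, List.nil_append]
  rw [show (fun i => countSegA (PySem.List.slice minerals (some i) (some (i + 5)))) =
        tripB minerals from funext (fun i => by rw [countSegA_eq]; rfl)]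
  rw [show (fun (bk : List (List (Int × Int × Int))) (i : Int) =>
        let seg := PySem.List.slice minerals (some i) (some (i + 5))
        let d : Int := PySem.List.count seg "diamond"
        let it : Int := PySem.List.count seg "iron"
        let s : Int := PySem.List.len seg - d - it
        PySem.List.pySetD bk (25 * d + 5 * it + s)
          (PySem.List.pyGetD bk (25 * d + 5 * it + s) [] ++ [(d, it, s)])) =
      (fun bk i => insB bk (tripB minerals i)) from rfl]
  rw [show (fun (arr : Int × Int × Int) => arr.1 * 25 + arr.2.1 * 5 + arr.2.2) = pvKey from rfl]
  rw [← List.foldl_map (f := tripB minerals) (g := insB)]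
  set ts := (PySem.List.pyRange 0 N 5).map (tripB minerals) with hts
  set bk0 := (PySem.List.pyRange 0 126 1).map (fun _ => ([] : List (Int × Int × Int))) with hbk0
  have hbounds : ∀ t ∈ ts, 0 ≤ pvKey t ∧ pvKey t < 126 := by
    intro t ht
    rcases List.mem_map.mp ht with ⟨i, hi, rfl⟩
    have hi0 : 0 ≤ i := by
      have := (PySem.List.mem_pyRange_iff_of_pos (by norm_num : (0:Int) < 5) i).mp hi
      omega
    exact trip_bounds minerals i hi0
  have hinit_len : bk0.length = 126 := by
    simp [hbk0, PySem.List.length_pyRange_one]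
  have hbk := buildInv ts bk0 hinit_len hbounds
  rw [run_greedy]
  have hflat : (PySem.List.pyRange 125 (-1) (-1)).flatMap
      (fun w => PySem.List.pyGetD (ts.foldl insB bk0) w []) =
      (PySem.List.pyRange 125 (-1) (-1)).flatMap
      (fun w => ts.filter (fun t => decide (pvKey t = w))) := by
    apply List.flatMap_congr
    intro w hw
    rcases ws_mem_bounds w hw with ⟨hw0, hw1⟩
    rw [hbk.2 w hw0 hw1]
    rw [hbk0, PySem.List.pyGetD_map_pyRange_of_nonneg _ _ _ _ hw0 hw1]
    simp
  rw [hflat]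
  rw [sortedRev_eq_flatMap _ ws_pairwise ts
    (fun a ha => ws_mem _ (hbounds a ha).1 (hbounds a ha).2)]

-- ===== VERDICT (by name: the statement is the Claim_ definition above) =====
theorem solution_spec : Claim_equal_solution := by
  intro picks minerals _ _
  unfold Spec_solution solution solution_alt
  exact main_bridge minerals _ _ _ _
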